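-- pv_equiv track=rewrite | github.com/rdawsonsdp/bsbshopify | shopify_sheets_sync.py | _get_note_attributes
-- ===== SOURCE A (Python) =====
-- from typing import List, Dict, Optional, Tuple, Any
--
-- def _get_note_attributes(attributes: List[dict]) -> dict:
--     """Extract note attributes from order"""
--     note_attributes = {}
--     for attribute in attributes:
--         if attribute.get("name") == "Pickup-Date":
--             note_attributes["pickupDate"] = attribute.get("value", "")
--         elif attribute.get("name") == "Pickup-Time":
--             note_attributes["pickupTime"] = attribute.get("value", "")
--         elif attribute.get("name") == "Checkout-Method":
--             note_attributes["checkoutMethod"] = attribute.get("value", "")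
--         elif attribute.get("name") == "Shipping Date":
--             note_attributes["shippingDate"] = attribute.get("value", "")
--         elif attribute.get("name") == "Shipping-Date":
--             note_attributes["shippingDate"] = attribute.get("value", "")
--     return note_attributes
-- ===== SOURCE B (Python) =====
-- from typing import List, Dict, Optional, Tuple, Any
--
-- _NAME_TO_KEY = {
--     "Pickup-Date": "pickupDate",
--     "Pickup-Time": "pickupTime",
--     "Checkout-Method": "checkoutMethod",
--     "Shipping Date": "shippingDate",
--     "Shipping-Date": "shippingDate",
-- }
--
-- def _get_note_attributes(attributes: List[dict]) -> dict:
--     """Extract note attributes from order (staged: trace, ordered dedup, reverse scan)."""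
--     keyed = [(_NAME_TO_KEY[a.get("name")], a.get("value", ""))
--              for a in attributes if a.get("name") in _NAME_TO_KEY]
--     return {key: next(v for k, v in reversed(keyed) if k == key)
--             for key in dict.fromkeys(k for k, _ in keyed)}
-- ===== Notes on version B (the rewrite author's own statement) =====
-- stated objective: alternative
-- what changed: Replaced A's single accumulator loop mutating a dict through an if/elif chain by a staged pipeline: extract a (key,value) trace by comprehension, take the ordered dedup of its keys (dict.fromkeys), and for each key find its last value by scanning the reversed trace.
import Mathlib
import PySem

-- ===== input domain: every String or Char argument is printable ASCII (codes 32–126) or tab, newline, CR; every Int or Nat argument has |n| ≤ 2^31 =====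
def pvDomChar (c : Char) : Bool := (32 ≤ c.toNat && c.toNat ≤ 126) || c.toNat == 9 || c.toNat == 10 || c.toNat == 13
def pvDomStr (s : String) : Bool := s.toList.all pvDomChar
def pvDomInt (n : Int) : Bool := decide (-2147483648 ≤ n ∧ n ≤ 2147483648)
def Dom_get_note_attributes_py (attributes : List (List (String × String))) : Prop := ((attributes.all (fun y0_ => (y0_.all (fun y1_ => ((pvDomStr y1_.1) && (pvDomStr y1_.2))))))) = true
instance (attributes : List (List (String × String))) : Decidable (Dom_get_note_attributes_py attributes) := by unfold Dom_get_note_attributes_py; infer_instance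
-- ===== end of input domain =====

-- B replaces A's single accumulator loop (if/elif chain mutating a dict) by a staged pipeline:
-- extract a (key,value) trace, ordered-dedup its keys, and take each key's last value by a reverse scan.

-- ===== PORT A =====
def get_note_attributes_py (attributes : List (List (String × String))) : List (String × String) :=
  (attributes.foldl (fun note attr =>
    let a := PySem.Dict.ofList attr
    if a.get? "name" = some "Pickup-Date" then note.insert "pickupDate" (a.getD "value" "")
    else if a.get? "name" = some "Pickup-Time" then note.insert "pickupTime" (a.getD "value" "")
    else if a.get? "name" = some "Checkout-Method" then note.insert "checkoutMethod" (a.getD "value" "")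
    else if a.get? "name" = some "Shipping Date" then note.insert "shippingDate" (a.getD "value" "")
    else if a.get? "name" = some "Shipping-Date" then note.insert "shippingDate" (a.getD "value" "")
    else note) PySem.Dict.empty).items

-- ===== PORT B =====
def pvNameToKey : PySem.Dict String String :=
  PySem.Dict.ofList [("Pickup-Date", "pickupDate"), ("Pickup-Time", "pickupTime"),
    ("Checkout-Method", "checkoutMethod"), ("Shipping Date", "shippingDate"),
    ("Shipping-Date", "shippingDate")]

-- the body of Source B's comprehension filter/extractor: (_NAME_TO_KEY[a.get("name")], a.get("value","")) when a.get("name") in _NAME_TO_KEY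
def pvTr (attr : List (String × String)) : Option (String × String) :=
  let a := PySem.Dict.ofList attr
  match a.get? "name" with
  | some n =>
    match pvNameToKey.get? n with
    | some key => some (key, a.getD "value" "")
    | none => none
  | none => none

def get_note_attributes_py_alt (attributes : List (List (String × String))) : List (String × String) :=
  -- keyed = [(_NAME_TO_KEY[a.get("name")], a.get("value","")) for a in attributes if a.get("name") in _NAME_TO_KEY]
  let keyed := attributes.filterMap pvTr
  -- {key: next(v for k, v in reversed(keyed) if k == key) for key in dict.fromkeys(k for k, _ in keyed)}
  (PySem.List.dedup (keyed.map (fun p => p.1))).map (fun key =>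
    (key, ((keyed.reverse.find? (fun p => p.1 == key)).map (fun p => p.2)).getD ""))

-- ===== PRECONDITION & SPEC =====
def Spec_get_note_attributes_py (attributes : List (List (String × String))) (out : List (String × String)) : Prop := out = get_note_attributes_py_alt attributes
instance (attributes : List (List (String × String))) (out : List (String × String)) : Decidable (Spec_get_note_attributes_py attributes out) := by unfold Spec_get_note_attributes_py; infer_instance

-- ===== CLAIM (what is proved, stated in full; the proofs are below) =====
def Claim_equal_get_note_attributes_py : Prop := ∀ (attributes : List (List (String × String))), Dom_get_note_attributes_py attributes → Spec_get_note_attributes_py attributes (get_note_attributes_py attributes)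

-- ===== LEMMAS AND PROOFS =====

-- The table lookup decides exactly what A's if/elif chain dispatches on.
theorem pvNameToKey_get? (n : String) :
    pvNameToKey.get? n =
      if n = "Pickup-Date" then some "pickupDate"
      else if n = "Pickup-Time" then some "pickupTime"
      else if n = "Checkout-Method" then some "checkoutMethod"
      else if n = "Shipping Date" then some "shippingDate"
      else if n = "Shipping-Date" then some "shippingDate"
      else none := by
  by_cases h1 : n = "Pickup-Date"
  · subst h1; decide
  by_cases h2 : n = "Pickup-Time"
  · subst h2; decide
  by_cases h3 : n = "Checkout-Method"
  · subst h3; decide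
  by_cases h4 : n = "Shipping Date"
  · subst h4; decide
  by_cases h5 : n = "Shipping-Date"
  · subst h5; decide
  rw [if_neg h1, if_neg h2, if_neg h3, if_neg h4, if_neg h5,
      PySem.Dict.get?_eq_none_iff_not_mem_keys]
  have hk : pvNameToKey.keys = ["Pickup-Date", "Pickup-Time", "Checkout-Method",
      "Shipping Date", "Shipping-Date"] := by decide
  rw [hk]
  simp [h1, h2, h3, h4, h5]

-- A's loop rephrased: it performs exactly one insert per element of the trace.
theorem pvA_fold_eq_trace_fold (attributes : List (List (String × String)))
    (d : PySem.Dict String String) :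
    attributes.foldl (fun note attr =>
      let a := PySem.Dict.ofList attr
      if a.get? "name" = some "Pickup-Date" then note.insert "pickupDate" (a.getD "value" "")
      else if a.get? "name" = some "Pickup-Time" then note.insert "pickupTime" (a.getD "value" "")
      else if a.get? "name" = some "Checkout-Method" then note.insert "checkoutMethod" (a.getD "value" "")
      else if a.get? "name" = some "Shipping Date" then note.insert "shippingDate" (a.getD "value" "")
      else if a.get? "name" = some "Shipping-Date" then note.insert "shippingDate" (a.getD "value" "")
      else note) d =
    (attributes.filterMap pvTr).foldl (fun d p => d.insert p.1 p.2) d := by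
  induction attributes generalizing d with
  | nil => rfl
  | cons attr rest ih =>
    rw [List.foldl_cons, List.filterMap_cons]
    have hstep :
        (let a := PySem.Dict.ofList attr
         if a.get? "name" = some "Pickup-Date" then d.insert "pickupDate" (a.getD "value" "")
         else if a.get? "name" = some "Pickup-Time" then d.insert "pickupTime" (a.getD "value" "")
         else if a.get? "name" = some "Checkout-Method" then d.insert "checkoutMethod" (a.getD "value" "")
         else if a.get? "name" = some "Shipping Date" then d.insert "shippingDate" (a.getD "value" "")
         else if a.get? "name" = some "Shipping-Date" then d.insert "shippingDate" (a.getD "value" "")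
         else d) =
        match pvTr attr with
        | some p => d.insert p.1 p.2
        | none => d := by
      unfold pvTr
      cases h : (PySem.Dict.ofList attr).get? "name" with
      | none => simp [h]
      | some n =>
        simp only [h, pvNameToKey_get?, Option.some.injEq]
        split_ifs <;> rfl
    cases h : pvTr attr with
    | none => simp only [h] at hstep; rw [hstep, ih]
    | some p => simp only [h] at hstep; rw [hstep, List.foldl_cons, ih]

-- lookup after a fold of inserts = last matching pair of the trace, else the start dict
theorem pv_getD_fold_insert (t : List (String × String)) (d : PySem.Dict String String) (k : String) :
    (t.foldl (fun d p => d.insert p.1 p.2) d).getD k "" =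
      match t.reverse.find? (fun p => p.1 == k) with
      | some p => p.2
      | none => d.getD k "" := by
  induction t using List.reverseRecOn generalizing d with
  | nil => rfl
  | append_singleton t p ih =>
    rw [List.foldl_append, List.foldl_cons, List.foldl_nil, PySem.Dict.getD_insert,
        List.reverse_append, List.reverse_singleton, List.singleton_append, List.find?_cons]
    by_cases hk : k = p.1
    · have : (p.1 == k) = true := by simp [hk]
      rw [this, if_pos hk]
    · have : (p.1 == k) = false := by simp [Ne.symm hk]
      rw [this, if_neg hk, ih]

-- ===== VERDICT (by name: the statement is the Claim_ definition above) =====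
theorem get_note_attributes_py_spec : Claim_equal_get_note_attributes_py := by
  intro attributes _
  unfold Spec_get_note_attributes_py get_note_attributes_py get_note_attributes_py_alt
  rw [pvA_fold_eq_trace_fold]
  have hnd : ((attributes.filterMap pvTr).foldl
      (fun d p => d.insert p.1 p.2) PySem.Dict.empty).keys.Nodup := by
    have := PySem.Dict.nodup_keys_foldl_insert_key (attributes.filterMap pvTr)
      (fun p => p.1) (fun _ p => p.2) PySem.Dict.empty PySem.Dict.nodup_keys_empty
    simpa using this
  rw [PySem.Dict.items_eq_map_keys _ hnd ""]
  have hkeys : ((attributes.filterMap pvTr).foldl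
      (fun d p => d.insert p.1 p.2) PySem.Dict.empty).keys =
      PySem.List.dedup ((attributes.filterMap pvTr).map (fun p => p.1)) := by
    have := PySem.Dict.keys_foldl_insert_key (attributes.filterMap pvTr)
      (fun p => p.1) (fun _ p => p.2) PySem.Dict.empty
    simpa [PySem.Set.update_nil_left] using this
  rw [hkeys]
  refine List.map_congr_left ?_
  intro k _
  rw [pv_getD_fold_insert]
  cases (attributes.filterMap pvTr).reverse.find? (fun p => p.1 == k) <;> simp
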